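-- pv_equiv track=rewrite | github.com/pilyeooong/algorithm | daily/240206.py | get_one_count_from_binary_under_n
-- ===== SOURCE A (Python) =====
-- def get_one_count_from_binary(check, n):
--     if n < 2:
--         return n
--
--     if n in check:
--         return check[n]
--
--     count = get_one_count_from_binary(check, n // 2) + n % 2
--     check[n] = count
--
--     return count
--
-- def get_one_count_from_binary_under_n(n):
--     check = {}
--     answer = 0
--     target_count = get_one_count_from_binary(check, n)
--
--     for i in range(n, 0, -1):
--         count = get_one_count_from_binary(check, i)
--         if count == target_count:
--             answer += 1
--
--     return answer
-- ===== SOURCE B (Python) =====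
-- def get_one_count_from_binary_under_n(n):
--     if n <= 0:
--         return 0
--     # popcount of n
--     k = 0
--     m = n
--     while m > 0:
--         k += m % 2
--         m //= 2
--     memo = {}
--
--     def count_below(m, j):
--         # how many integers in [0, m) have exactly j set bits
--         if j < 0 or m <= 0:
--             return 0
--         if j == 0:
--             return 1
--         if m == 1:
--             return 0
--         if (m, j) not in memo:
--             memo[(m, j)] = count_below((m + 1) // 2, j) + count_below(m // 2, j - 1)
--         return memo[(m, j)]
--
--     return count_below(n + 1, k)
-- ===== Notes on version B (the rewrite author's own statement) =====
-- stated objective: faster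
-- what changed: replaces A's memoized-popcount linear scan over every candidate integer with a halving divide-and-conquer count (memoized on (bound, bit-count)) of the integers not exceeding n that share n's popcount
import Mathlib
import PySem

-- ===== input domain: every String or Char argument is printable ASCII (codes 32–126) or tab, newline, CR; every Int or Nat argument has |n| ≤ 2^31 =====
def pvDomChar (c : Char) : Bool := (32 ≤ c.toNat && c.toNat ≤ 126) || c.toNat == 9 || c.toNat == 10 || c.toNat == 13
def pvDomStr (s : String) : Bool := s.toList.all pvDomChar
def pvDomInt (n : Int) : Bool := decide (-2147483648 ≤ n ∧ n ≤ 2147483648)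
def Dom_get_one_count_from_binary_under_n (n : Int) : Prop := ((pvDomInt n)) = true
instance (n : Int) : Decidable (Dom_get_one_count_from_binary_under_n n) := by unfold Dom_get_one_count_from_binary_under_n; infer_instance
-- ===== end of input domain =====

-- B replaces A's linear scan over every candidate integer with a memoized halving count
-- of the integers not exceeding n that share n's popcount (objective: faster).

-- ===== PORT A =====
-- Python's memoized helper get_one_count_from_binary(check, n); the mutated dict is threaded
def pvHMEmptyA : Std.HashMap Int Int := ∅

-- (fuel only makes the halving recursion structural; n.toNat + 1 halvings always suffice)
def pvGetOneCountGo (fuel : Nat) (check : Std.HashMap Int Int) (n : Int) :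
    Int × Std.HashMap Int Int :=
  match fuel with
  | 0 => (n, check)
  | fuel + 1 =>
    if n < 2 then (n, check)
    else
      match check[n]? with
      | some v => (v, check)
      | none =>
        let r := pvGetOneCountGo fuel check (PySem.Int.floordiv n 2)
        let count := r.1 + PySem.Int.mod n 2
        (count, r.2.insert n count)

def get_one_count_from_binary (check : Std.HashMap Int Int) (n : Int) :
    Int × Std.HashMap Int Int :=
  pvGetOneCountGo (n.toNat + 1) check n

-- the body of A's 'for i in range(n, 0, -1)' loop, threading (answer, check)
def pvStepA (target : Int) (st : Int × Std.HashMap Int Int) (i : Int) :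
    Int × Std.HashMap Int Int :=
  let r := get_one_count_from_binary st.2 i
  (if r.1 = target then st.1 + 1 else st.1, r.2)

def get_one_count_from_binary_under_n (n : Int) : Int :=
  let t := get_one_count_from_binary pvHMEmptyA n
  ((PySem.List.pyRange n 0 (-1)).foldl (pvStepA t.1) (0, t.2)).1

-- ===== PORT B =====
-- B's popcount while-loop: k accumulates m % 2 while m is halved
def pvPopcountGo (fuel : Nat) (k m : Int) : Int :=
  match fuel with
  | 0 => k
  | fuel + 1 =>
    if 0 < m then pvPopcountGo fuel (k + PySem.Int.mod m 2) (PySem.Int.floordiv m 2) else k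

def pvPopcountLoop (k m : Int) : Int := pvPopcountGo (m.toNat + 1) k m

-- B's count_below(m, j): integers in [0, m) with exactly j set bits, memo threaded
def pvHMEmptyB : Std.HashMap (Int × Int) Int := ∅

def pvCountBelowGo (fuel : Nat) (memo : Std.HashMap (Int × Int) Int) (m j : Int) :
    Int × Std.HashMap (Int × Int) Int :=
  match fuel with
  | 0 => (0, memo)
  | fuel + 1 =>
    if j < 0 ∨ m ≤ 0 then (0, memo)
    else if j = 0 then (1, memo)
    else if m = 1 then (0, memo)
    else
      match memo[(m, j)]? with
      | some v => (v, memo)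
      | none =>
        let r1 := pvCountBelowGo fuel memo (PySem.Int.floordiv (m + 1) 2) j
        let r2 := pvCountBelowGo fuel r1.2 (PySem.Int.floordiv m 2) (j - 1)
        let v := r1.1 + r2.1
        (v, r2.2.insert (m, j) v)

def pvCountBelow (memo : Std.HashMap (Int × Int) Int) (m j : Int) :
    Int × Std.HashMap (Int × Int) Int :=
  pvCountBelowGo (m.toNat + 1) memo m j

def get_one_count_from_binary_under_n_alt (n : Int) : Int :=
  if n ≤ 0 then 0
  else
    let k := pvPopcountLoop 0 n
    (pvCountBelow pvHMEmptyB (n + 1) k).1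

-- ===== PRECONDITION & SPEC =====
def Spec_get_one_count_from_binary_under_n (n : Int) (out : Int) : Prop := out = get_one_count_from_binary_under_n_alt n
instance (n : Int) (out : Int) : Decidable (Spec_get_one_count_from_binary_under_n n out) := by unfold Spec_get_one_count_from_binary_under_n; infer_instance

-- ===== CLAIM (what is proved, stated in full; the proofs are below) =====
def Claim_equal_get_one_count_from_binary_under_n : Prop := ∀ (n : Int), Dom_get_one_count_from_binary_under_n n → Spec_get_one_count_from_binary_under_n n (get_one_count_from_binary_under_n n)

-- ===== LEMMAS AND PROOFS =====

-- pure popcount: proof-side model of A's memoized helper and of B's while-loop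
def pvPc (n : Int) : Int :=
  if n < 2 then n else pvPc (PySem.Int.floordiv n 2) + PySem.Int.mod n 2
termination_by n.toNat
decreasing_by
  simp only [PySem.Int.floordiv_eq_ediv_of_pos (by omega : (0:Int) < 2)]
  omega

theorem pvFd2 (a : Int) : PySem.Int.floordiv a 2 = a / 2 :=
  PySem.Int.floordiv_eq_ediv_of_pos (by omega)

theorem pvMd2 (a : Int) : PySem.Int.mod a 2 = a % 2 :=
  PySem.Int.mod_eq_emod_of_pos (by omega)

theorem pvPc_zero : pvPc 0 = 0 := by rw [pvPc]; norm_num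

theorem pvPc_one : pvPc 1 = 1 := by rw [pvPc]; norm_num

theorem pvPc_nonneg (n : Int) (h : 0 ≤ n) : 0 ≤ pvPc n := by
  generalize hN : n.toNat = N
  induction N using Nat.strong_induction_on generalizing n with
  | _ N ih =>
    rw [pvPc]
    split
    · exact h
    · rename_i h2
      rw [pvFd2, pvMd2]
      have := ih ((n/2).toNat) (by omega) (n/2) (by omega) rfl
      omega

theorem pvPc_pos (n : Int) (h : 1 ≤ n) : 1 ≤ pvPc n := by
  generalize hN : n.toNat = N
  induction N using Nat.strong_induction_on generalizing n with
  | _ N ih =>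
    rw [pvPc]
    split
    · omega
    · rename_i h2
      rw [pvFd2, pvMd2]
      have := ih ((n/2).toNat) (by omega) (n/2) (by omega) rfl
      omega

theorem pvPc_rec_pos (m : Int) (h : 1 ≤ m) :
    pvPc m = pvPc (m / 2) + m % 2 := by
  rcases (by omega : m < 2 ∨ 2 ≤ m) with h2 | h2
  · have : m = 1 := by omega
    subst this
    norm_num [pvPc_one, pvPc_zero]
  · rw [pvPc, if_neg (by omega), pvFd2, pvMd2]

theorem pvPc_double (t : Int) (h : 0 ≤ t) : pvPc (2 * t) = pvPc t := by
  rcases eq_or_lt_of_le h with h0 | h0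
  · subst h0
    norm_num [pvPc_zero]
  · rw [pvPc, if_neg (by omega), pvFd2, pvMd2]
    have e1 : 2 * t / 2 = t := by omega
    have e2 : 2 * t % 2 = 0 := by omega
    rw [e1, e2, add_zero]

theorem pvPc_double_succ (t : Int) (h : 0 ≤ t) : pvPc (2 * t + 1) = pvPc t + 1 := by
  rcases eq_or_lt_of_le h with h0 | h0
  · subst h0
    norm_num [pvPc_one, pvPc_zero]
  · rw [pvPc, if_neg (by omega), pvFd2, pvMd2]
    have e1 : (2 * t + 1) / 2 = t := by omega
    have e2 : (2 * t + 1) % 2 = 1 := by omega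
    rw [e1, e2]

-- specification count: #{ i < m : popcount i = j }
def pvCUp (m : Nat) (j : Int) : Int :=
  (((List.range m).filter (fun i : Nat => pvPc (i : Int) = j)).length : Int)

theorem pvCUp_succ (m : Nat) (j : Int) :
    pvCUp (m + 1) j = pvCUp m j + (if pvPc (m : Int) = j then 1 else 0) := by
  unfold pvCUp
  rw [List.range_succ, List.filter_append, List.length_append]
  by_cases hp : pvPc (m : Int) = j
  · simp [hp]
  · simp [hp]

theorem pvCUp_neg (m : Nat) (j : Int) (h : j < 0) : pvCUp m j = 0 := by
  unfold pvCUp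
  have : (List.range m).filter (fun i : Nat => pvPc (i : Int) = j) = [] := by
    apply List.filter_eq_nil_iff.mpr
    intro a _
    have := pvPc_nonneg (a : Int) (Int.natCast_nonneg a)
    simp
    omega
  rw [this]
  rfl

theorem pvCUp_split (m : Nat) (j : Int) :
    pvCUp m j = pvCUp ((m + 1) / 2) j + pvCUp (m / 2) (j - 1) := by
  induction m generalizing j with
  | zero => simp [pvCUp]
  | succ m ih =>
    obtain ⟨t, ht⟩ : ∃ t, m = 2 * t ∨ m = 2 * t + 1 := ⟨m / 2, by omega⟩
    rcases ht with h | h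
    · have e1 : (m + 1 + 1) / 2 = t + 1 := by omega
      have e2 : (m + 1) / 2 = t := by omega
      have e3 : m / 2 = t := by omega
      rw [e1, e2, pvCUp_succ, ih, e2, e3, pvCUp_succ]
      have hpc : pvPc (m : Int) = pvPc (t : Int) := by
        have : (m : Int) = 2 * (t : Int) := by push_cast [h]; ring
        rw [this, pvPc_double _ (Int.natCast_nonneg t)]
      rw [hpc]
      ring
    · have e1 : (m + 1 + 1) / 2 = t + 1 := by omega
      have e2 : (m + 1) / 2 = t + 1 := by omega
      have e3 : m / 2 = t := by omega
      rw [e1, e2, pvCUp_succ, ih, e2, e3, pvCUp_succ]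
      have hpc : pvPc (m : Int) = pvPc (t : Int) + 1 := by
        have : (m : Int) = 2 * (t : Int) + 1 := by push_cast [h]; ring
        rw [this, pvPc_double_succ _ (Int.natCast_nonneg t)]
      rw [hpc, pvCUp_succ t (j - 1)]
      by_cases hc : pvPc (t : Int) = j - 1
      · rw [if_pos hc, if_pos (show pvPc (t : Int) + 1 = j by omega)]
        ring
      · rw [if_neg hc, if_neg (show ¬ pvPc (t : Int) + 1 = j by omega)]
        ring

theorem pvCUp_zero (m : Nat) (h : 1 ≤ m) : pvCUp m 0 = 1 := by
  induction m using Nat.strong_induction_on with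
  | _ m ih =>
    rcases (by omega : m < 2 ∨ 2 ≤ m) with h2 | h2
    · have : m = 1 := by omega
      subst this
      norm_num [pvCUp, List.range_one, List.filter_singleton, pvPc_zero]
    · rw [pvCUp_split m 0]
      have hneg : pvCUp (m / 2) (0 - 1) = 0 := pvCUp_neg _ _ (by norm_num)
      rw [hneg, add_zero]
      exact ih ((m + 1) / 2) (by omega) (by omega)

-- pure model of B's count_below
def pvCnt (m j : Int) : Int :=
  if j < 0 ∨ m ≤ 0 then 0
  else if j = 0 then 1
  else if m = 1 then 0
  else pvCnt (PySem.Int.floordiv (m + 1) 2) j + pvCnt (PySem.Int.floordiv m 2) (j - 1)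
termination_by m.toNat
decreasing_by
  · simp only [PySem.Int.floordiv_eq_ediv_of_pos (by omega : (0:Int) < 2)]
    omega
  · simp only [PySem.Int.floordiv_eq_ediv_of_pos (by omega : (0:Int) < 2)]
    omega

theorem pvCnt_eq_cUp (m : Nat) (j : Int) : pvCnt (m : Int) j = pvCUp m j := by
  induction m using Nat.strong_induction_on generalizing j with
  | _ m ih =>
    rw [pvCnt]
    by_cases hj : j < 0
    · rw [if_pos (Or.inl hj), pvCUp_neg _ _ hj]
    · by_cases hm0 : m = 0
      · subst hm0
        norm_num [pvCUp]
      · rw [if_neg (by omega)]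
        by_cases hj0 : j = 0
        · rw [if_pos hj0, hj0, pvCUp_zero m (by omega)]
        · rw [if_neg hj0]
          by_cases hm1 : m = 1
          · subst hm1
            rw [if_pos (by norm_num)]
            have h0 : (decide (pvPc ((0 : Int)) = j)) = false := by
              simp only [pvPc_zero, decide_eq_false_iff_not]
              omega
            simp [pvCUp, List.range_one, h0]
          · rw [if_neg (by exact_mod_cast hm1), pvFd2, pvFd2]
            have e1 : ((m : Int) + 1) / 2 = (((m + 1) / 2 : Nat) : Int) := by omega
            have e2 : (m : Int) / 2 = ((m / 2 : Nat) : Int) := by omega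
            rw [e1, e2, ih ((m + 1) / 2) (by omega) j, ih (m / 2) (by omega) (j - 1),
              ← pvCUp_split]

theorem pvHM_get?_insert {κ ν : Type} [BEq κ] [Hashable κ] [LawfulBEq κ] [DecidableEq κ]
    (d : Std.HashMap κ ν) (k k' : κ) (v : ν) :
    (d.insert k v)[k']? = if k' = k then some v else d[k']? := by
  rw [Std.HashMap.getElem?_insert]
  split <;> split <;> simp_all

-- A's memo maps every stored key to its popcount
def pvInvA (d : Std.HashMap Int Int) : Prop :=
  ∀ m v, d[m]? = some v → v = pvPc m

theorem pvA_run (N : Nat) (n : Int) (hn : n.toNat < N) (d : Std.HashMap Int Int)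
    (hd : pvInvA d) :
    (pvGetOneCountGo N d n).1 = pvPc n ∧
      pvInvA (pvGetOneCountGo N d n).2 := by
  induction N generalizing n d with
  | zero => omega
  | succ N ih =>
    by_cases h2 : n < 2
    · rw [pvGetOneCountGo, if_pos h2, pvPc, if_pos h2]
      exact ⟨rfl, hd⟩
    · rw [pvGetOneCountGo, if_neg h2]
      cases hg : d[n]? with
      | some v =>
        exact ⟨hd n v hg, hd⟩
      | none =>
        have hn2 : (PySem.Int.floordiv n 2).toNat < N := by rw [pvFd2]; omega
        obtain ⟨h1, hInv⟩ := ih (PySem.Int.floordiv n 2) hn2 d hd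
        have hpc : pvPc n = pvPc (PySem.Int.floordiv n 2) + PySem.Int.mod n 2 := by
          rw [pvPc, if_neg h2]
        have key : (pvGetOneCountGo N d (PySem.Int.floordiv n 2)).1 +
            PySem.Int.mod n 2 = pvPc n := by rw [h1]; exact hpc.symm
        refine ⟨key, ?_⟩
        intro m v hmv
        rw [pvHM_get?_insert] at hmv
        split at hmv
        · rename_i hm
          subst hm
          simp only [Option.some.injEq] at hmv
          rw [← hmv, key]
        · exact hInv m v hmv

-- B's memo maps every stored key (m, j) to pvCnt m j
def pvInvB (d : Std.HashMap (Int × Int) Int) : Prop :=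
  ∀ m j v, d[(m, j)]? = some v → v = pvCnt m j

theorem pvB_run (N : Nat) (m j : Int) (hm : m.toNat < N) (d : Std.HashMap (Int × Int) Int)
    (hd : pvInvB d) :
    (pvCountBelowGo N d m j).1 = pvCnt m j ∧ pvInvB (pvCountBelowGo N d m j).2 := by
  induction N generalizing m j d with
  | zero => omega
  | succ N ih =>
    by_cases hbase : j < 0 ∨ m ≤ 0
    · rw [pvCountBelowGo, if_pos hbase, pvCnt, if_pos hbase]
      exact ⟨rfl, hd⟩
    · by_cases hj0 : j = 0
      · rw [pvCountBelowGo, if_neg hbase, if_pos hj0, pvCnt, if_neg hbase, if_pos hj0]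
        exact ⟨rfl, hd⟩
      · by_cases hm1 : m = 1
        · rw [pvCountBelowGo, if_neg hbase, if_neg hj0, if_pos hm1,
            pvCnt, if_neg hbase, if_neg hj0, if_pos hm1]
          exact ⟨rfl, hd⟩
        · rw [pvCountBelowGo, if_neg hbase, if_neg hj0, if_neg hm1]
          have hcnt : pvCnt m j =
              pvCnt (PySem.Int.floordiv (m + 1) 2) j +
                pvCnt (PySem.Int.floordiv m 2) (j - 1) := by
            rw [pvCnt, if_neg hbase, if_neg hj0, if_neg hm1]
          cases hg : d[(m, j)]? with
          | some v =>
            exact ⟨hd m j v hg, hd⟩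
          | none =>
            have hb1 : (PySem.Int.floordiv (m + 1) 2).toNat < N := by rw [pvFd2]; omega
            have hb2 : (PySem.Int.floordiv m 2).toNat < N := by rw [pvFd2]; omega
            obtain ⟨e1, i1⟩ := ih (PySem.Int.floordiv (m + 1) 2) j hb1 d hd
            obtain ⟨e2, i2⟩ := ih (PySem.Int.floordiv m 2) (j - 1) hb2 _ i1
            have key : (pvCountBelowGo N d (PySem.Int.floordiv (m + 1) 2) j).1 +
                (pvCountBelowGo N (pvCountBelowGo N d (PySem.Int.floordiv (m + 1) 2) j).2
                  (PySem.Int.floordiv m 2) (j - 1)).1 = pvCnt m j := by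
              rw [e1, e2]; exact hcnt.symm
            refine ⟨key, ?_⟩
            intro m' j' v hmv
            rw [pvHM_get?_insert] at hmv
            split at hmv
            · rename_i hm'
              rw [Prod.mk.injEq] at hm'
              obtain ⟨hma, hmb⟩ := hm'
              subst hma; subst hmb
              simp only [Option.some.injEq] at hmv
              rw [← hmv, key]
            · exact i2 m' j' v hmv

theorem pvPopcountLoop_eq (N : Nat) (m : Int) (hm : m.toNat < N) (k : Int) (h : 0 ≤ m) :
    pvPopcountGo N k m = k + pvPc m := by
  induction N generalizing m k with
  | zero => omega
  | succ N ih =>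
    by_cases hp : 0 < m
    · rw [pvPopcountGo, if_pos hp]
      have hb : (PySem.Int.floordiv m 2).toNat < N := by rw [pvFd2]; omega
      rw [ih (PySem.Int.floordiv m 2) hb _ (by rw [pvFd2]; omega)]
      rw [pvFd2, pvMd2, pvPc_rec_pos m (by omega)]
      ring
    · have h0 : m = 0 := by omega
      subst h0
      rw [pvPopcountGo, if_neg (by omega), pvPc_zero, add_zero]

theorem pvFold_count (L : List Int) (target acc : Int) (d : Std.HashMap Int Int)
    (hd : pvInvA d) :
    (L.foldl (pvStepA target) (acc, d)).1 =
      acc + (((L.filter (fun i => pvPc i = target)).length : Nat) : Int) ∧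
      pvInvA (L.foldl (pvStepA target) (acc, d)).2 := by
  induction L generalizing acc d with
  | nil =>
    refine ⟨?_, hd⟩
    simp
  | cons i L ih =>
    rw [List.foldl_cons]
    obtain ⟨h1, h2⟩ := pvA_run (i.toNat + 1) i (by omega) d hd
    have hstep : pvStepA target (acc, d) i =
        (if pvPc i = target then acc + 1 else acc,
          (pvGetOneCountGo (i.toNat + 1) d i).2) := by
      simp only [pvStepA, get_one_count_from_binary, h1]
    rw [hstep]
    obtain ⟨h3, h4⟩ := ih (if pvPc i = target then acc + 1 else acc) _ h2
    refine ⟨?_, h4⟩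
    rw [h3, List.filter_cons]
    by_cases hc : pvPc i = target
    · simp [hc]
      ring
    · simp [hc]

theorem pvInvA_empty : pvInvA pvHMEmptyA := by
  intro m v h
  simp [pvHMEmptyA] at h

theorem pvInvB_empty : pvInvB pvHMEmptyB := by
  intro m j v h
  simp [pvHMEmptyB] at h

theorem pv_main (n : Int) :
    get_one_count_from_binary_under_n n = get_one_count_from_binary_under_n_alt n := by
  by_cases hn : n ≤ 0
  · simp only [get_one_count_from_binary_under_n, get_one_count_from_binary_under_n_alt,
      if_pos hn]
    rw [PySem.List.pyRange_neg_one_eq_nil hn, List.foldl_nil]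
  · -- 0 < n
    have hn1 : 1 ≤ n := by omega
    obtain ⟨ht1, ht2⟩ := pvA_run (n.toNat + 1) n (by omega) pvHMEmptyA pvInvA_empty
    simp only [get_one_count_from_binary_under_n, get_one_count_from_binary_under_n_alt,
      get_one_count_from_binary, if_neg hn]
    rw [ht1]
    obtain ⟨hF, -⟩ := pvFold_count (PySem.List.pyRange n 0 (-1)) (pvPc n) 0
      (pvGetOneCountGo (n.toNat + 1) pvHMEmptyA n).2 ht2
    rw [hF, zero_add]
    -- B side
    rw [show pvPopcountLoop 0 n = pvPopcountGo (n.toNat + 1) 0 n from rfl,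
      pvPopcountLoop_eq (n.toNat + 1) n (by omega) 0 (by omega), zero_add]
    obtain ⟨hB, -⟩ := pvB_run ((n + 1).toNat + 1) (n + 1) (pvPc n) (by omega) pvHMEmptyB
      pvInvB_empty
    rw [show pvCountBelow pvHMEmptyB (n + 1) (pvPc n) =
      pvCountBelowGo ((n + 1).toNat + 1) pvHMEmptyB (n + 1) (pvPc n) from rfl, hB]
    have hc : (n + 1) = ((n.toNat + 1 : Nat) : Int) := by omega
    rw [hc, pvCnt_eq_cUp]
    -- count over the countdown range = count over [1..n]
    rw [PySem.List.pyRange_neg_one_eq_reverse, List.filter_reverse, List.length_reverse]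
    have h01 : (0 : Int) + 1 = 1 := by norm_num
    rw [h01, PySem.List.pyRange_one, List.filter_map, List.length_map]
    have hnn : (n + 1 - 1).toNat = n.toNat := by omega
    rw [hnn]
    -- count over [0..n] = count over [1..n] since popcount 0 = 0 < popcount n
    unfold pvCUp
    rw [List.range_succ_eq_map, List.filter_cons]
    have hne : ¬ (pvPc ((0 : Nat) : Int) = pvPc n) := by
      have := pvPc_pos n hn1
      simp only [Nat.cast_zero, pvPc_zero]
      omega
    rw [if_neg (by simpa using hne)]
    rw [List.filter_map, List.length_map]
    refine congrArg _ (congrArg List.length (List.filter_congr ?_))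
    intro k _
    simp only [Function.comp_apply]
    have : (1 : Int) + (k : Int) = ((k.succ : Nat) : Int) := by push_cast; ring
    rw [this]

-- ===== VERDICT (by name: the statement is the Claim_ definition above) =====
theorem get_one_count_from_binary_under_n_spec : Claim_equal_get_one_count_from_binary_under_n := by
  intro n _
  exact pv_main n
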